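-- pv_equiv track=rewrite | github.com/tomp/AOC-2018 | day10/day10.py | trim_sky
-- ===== SOURCE A (Python) =====
-- def trim_sky(lines):
--     coords = []
--     for lineno, line in enumerate(lines):
--         coords.extend([(idx, lineno) for idx, ch in enumerate(line) if ch == '#'])
--
--     xmax = max([p[0] for p in coords])
--     xmin = min([p[0] for p in coords])
--     ymax = max([p[1] for p in coords])
--     ymin = min([p[1] for p in coords])
--
--     result = []
--     for _ in range(ymax - ymin + 1):
--         result.append([' '] * (xmax - xmin + 1))
--     for x, y in coords:
--         result[y-ymin][x-xmin] = '#'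
--
--     return "\n".join(["".join(line) for line in result])
-- ===== SOURCE B (Python) =====
-- def trim_sky(lines):
--     # One pass maintaining only the bounding box (no coords list, no mutable grid);
--     # output gathered by reading characters straight from the source lines.
--     box = None  # (xmin, xmax, ymin, ymax)
--     for y, line in enumerate(lines):
--         for x, ch in enumerate(line):
--             if ch == '#':
--                 if box is None:
--                     box = (x, x, y, y)
--                 else:
--                     xmin, xmax, ymin, _ = box
--                     box = (min(xmin, x), max(xmax, x), ymin, y)
--     if box is None:
--         raise ValueError("no '#' in input")
--     xmin, xmax, ymin, ymax = box
--     return "\n".join(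
--         "".join('#' if x < len(lines[y]) and lines[y][x] == '#' else ' '
--                 for x in range(xmin, xmax + 1))
--         for y in range(ymin, ymax + 1))
-- ===== Notes on version B (the rewrite author's own statement) =====
-- stated objective: alternative
-- what changed: A collects every '#' coordinate into a list, allocates a mutable space-filled grid and scatters '#' writes into it; B keeps only a running bounding box (four numbers) during one scan and then gathers the output by reading characters directly from the source lines.
import Mathlib
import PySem

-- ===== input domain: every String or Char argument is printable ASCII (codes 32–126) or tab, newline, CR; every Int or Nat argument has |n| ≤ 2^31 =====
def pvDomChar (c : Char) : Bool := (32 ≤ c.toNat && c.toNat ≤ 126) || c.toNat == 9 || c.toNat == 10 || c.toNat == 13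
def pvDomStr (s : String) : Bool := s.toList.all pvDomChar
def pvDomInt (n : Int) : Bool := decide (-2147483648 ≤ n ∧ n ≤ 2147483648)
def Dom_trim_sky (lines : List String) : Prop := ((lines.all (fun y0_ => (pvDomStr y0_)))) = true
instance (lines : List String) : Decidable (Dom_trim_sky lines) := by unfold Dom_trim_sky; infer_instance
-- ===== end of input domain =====

-- B replaces A's coords list + scatter into a mutable grid by a single bounding-box scan
-- (four running numbers) and a gather that reads characters straight from the input lines
-- (objective: alternative decomposition, same asymptotic cost).

-- ===== PORT A =====
-- [(idx, lineno) for idx, ch in enumerate(line) if ch == '#']  (idx running from i)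
def rowCoordsA (lineno : Nat) : List Char → Nat → List (Nat × Nat)
  | [], _ => []
  | c :: rest, i => (if c = '#' then [(i, lineno)] else []) ++ rowCoordsA lineno rest (i + 1)

-- the outer loop: coords.extend(...) over enumerate(lines, start n)
def coordsA : List String → Nat → List (Nat × Nat)
  | [], _ => []
  | l :: rest, lineno => rowCoordsA lineno l.toList 0 ++ coordsA rest (lineno + 1)

-- "\n".join(...) over already-joined rows, as a char-list computation
def joinNL : List (List Char) → List Char
  | [] => []
  | [r] => r
  | r :: rs => r ++ '\n' :: joinNL rs

def trim_sky (lines : List String) : String :=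
  let coords := coordsA lines 0
  match PySem.List.max? (coords.map (fun p => p.1)) (fun v => v),
        PySem.List.min? (coords.map (fun p => p.1)) (fun v => v),
        PySem.List.max? (coords.map (fun p => p.2)) (fun v => v),
        PySem.List.min? (coords.map (fun p => p.2)) (fun v => v) with
  | some xmax, some xmin, some ymax, some ymin =>
      let init : List (List Char) :=
        List.replicate (ymax - ymin + 1) (List.replicate (xmax - xmin + 1) ' ')
      let grid := coords.foldl
        (fun g p => g.modify (p.2 - ymin) (fun row => row.set (p.1 - xmin) '#')) init
      String.mk (joinNL (grid.map (fun r => r)))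
  | _, _, _, _ => ""  -- Python: max([]) raises ValueError here; excluded by Pre_

-- ===== PORT B =====
-- bounding-box update for one '#' at column x, line y
def updB (y x : Nat) (st : Option (Nat × Nat × Nat × Nat)) : Option (Nat × Nat × Nat × Nat) :=
  match st with
  | none => some (x, x, y, y)
  | some (a, b, c, _) => some (min a x, max b x, c, y)

def scanRowB (y : Nat) : List Char → Nat → Option (Nat × Nat × Nat × Nat) → Option (Nat × Nat × Nat × Nat)
  | [], _, st => st
  | c :: rest, x, st => scanRowB y rest (x + 1) (if c = '#' then updB y x st else st)

def scanB : List String → Nat → Option (Nat × Nat × Nat × Nat) → Option (Nat × Nat × Nat × Nat)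
  | [], _, st => st
  | l :: rest, y, st => scanB rest (y + 1) (scanRowB y l.toList 0 st)

-- ''.join('#' if x < len(line) and line[x] == '#' else ' ' for x in range(xmin, xmax+1))
def rowB (line : List Char) (xmin xmax : Nat) : List Char :=
  (List.range' xmin (xmax + 1 - xmin)).map (fun x => if line.getD x ' ' = '#' then '#' else ' ')

def trim_sky_alt (lines : List String) : String :=
  match scanB lines 0 none with
  | none => ""  -- Python B raises ValueError here; excluded by Pre_
  | some (xmin, xmax, ymin, ymax) =>
      String.mk (joinNL ((List.range' ymin (ymax + 1 - ymin)).map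
        (fun y => rowB (lines.getD y "").toList xmin xmax)))

-- ===== PRECONDITION & SPEC =====
-- Pre_ excludes exactly the inputs with no '#' character anywhere: there A raises
-- ValueError (max() of an empty list) and B raises ValueError as well.
def Pre_trim_sky (lines : List String) : Prop := ∃ l ∈ lines, '#' ∈ l.toList
instance (lines : List String) : Decidable (Pre_trim_sky lines) := by unfold Pre_trim_sky; infer_instance
def pvWitness_trim_sky : List String := [" #", "## "]

def Spec_trim_sky (lines : List String) (out : String) : Prop := out = trim_sky_alt lines
instance (lines : List String) (out : String) : Decidable (Spec_trim_sky lines out) := by unfold Spec_trim_sky; infer_instance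

-- ===== CLAIM (what is proved, stated in full; the proofs are below) =====
def Claim_equal_trim_sky : Prop := ∀ (lines : List String), Dom_trim_sky lines → Pre_trim_sky lines → Spec_trim_sky lines (trim_sky lines)

-- ===== LEMMAS AND PROOFS =====

-- the fold step B's scan amounts to, per '#' coordinate
def bstep (st : Option (Nat × Nat × Nat × Nat)) (p : Nat × Nat) : Option (Nat × Nat × Nat × Nat) :=
  updB p.2 p.1 st

theorem scanRowB_eq_foldl (y : Nat) (cs : List Char) : ∀ (x : Nat) st,
    scanRowB y cs x st = (rowCoordsA y cs x).foldl bstep st := by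
  induction cs with
  | nil => intro x st; simp [scanRowB, rowCoordsA]
  | cons c rest ih =>
    intro x st
    by_cases h : c = '#' <;> simp [scanRowB, rowCoordsA, h, ih, bstep]

theorem scanB_eq_foldl (ls : List String) : ∀ (y : Nat) st,
    scanB ls y st = (coordsA ls y).foldl bstep st := by
  induction ls with
  | nil => intro y st; simp [scanB, coordsA]
  | cons l rest ih =>
    intro y st
    simp [scanB, coordsA, List.foldl_append, scanRowB_eq_foldl, ih]

theorem foldl_bstep_some (ps : List (Nat × Nat)) : ∀ (a b c d : Nat),
    ps.foldl bstep (some (a, b, c, d)) =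
      some ((ps.map (fun p => p.1)).foldl min a, (ps.map (fun p => p.1)).foldl max b, c,
            (ps.map (fun p => p.2)).foldl (fun _ y => y) d) := by
  induction ps with
  | nil => intro a b c d; simp
  | cons p t ih => intro a b c d; simp [bstep, updB, ih]

theorem foldl_min_sorted (t : List Nat) : ∀ (d : Nat), (∀ y ∈ t, d ≤ y) → t.foldl min d = d := by
  induction t with
  | nil => intro d _; rfl
  | cons y t ih =>
    intro d h
    simp only [List.foldl_cons]
    rw [Nat.min_eq_left (h y (by simp))]
    exact ih d (fun z hz => h z (by simp [hz]))

theorem foldl_last_sorted (t : List Nat) : ∀ (d : Nat), (d :: t).Pairwise (· ≤ ·) →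
    t.foldl (fun _ y => y) d = t.foldl max d := by
  induction t with
  | nil => intro d _; rfl
  | cons y t ih =>
    intro d h
    simp only [List.foldl_cons]
    rw [Nat.max_eq_right (List.rel_of_pairwise_cons h (by simp))]
    exact ih y (List.Pairwise.sublist (by simp) h)

-- membership characterisations
theorem mem_rowCoordsA (y0 : Nat) (cs : List Char) : ∀ (i x y : Nat),
    (x, y) ∈ rowCoordsA y0 cs i ↔ y = y0 ∧ ∃ j, x = i + j ∧ cs[j]? = some '#' := by
  induction cs with
  | nil => intro i x y; simp [rowCoordsA]
  | cons c rest ih =>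
    intro i x y
    constructor
    · intro h
      simp only [rowCoordsA, List.mem_append] at h
      rcases h with h | h
      · by_cases hc : c = '#'
        · simp [hc] at h
          exact ⟨h.2, 0, by simp [h.1, hc]⟩
        · simp [hc] at h
      · obtain ⟨hy, j, hx, hj⟩ := (ih (i + 1) x y).mp h
        exact ⟨hy, j + 1, by omega, by simpa using hj⟩
    · rintro ⟨hy, j, hx, hj⟩
      simp only [rowCoordsA, List.mem_append]
      cases j with
      | zero =>
        left
        simp at hj
        simp [hj, hy]; omega
      | succ j =>
        right
        refine (ih (i + 1) x y).mpr ⟨hy, j, by omega, by simpa using hj⟩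

def cellP (ls : List String) (y x : Nat) : Prop := ∃ s, ls[y]? = some s ∧ s.toList[x]? = some '#'

theorem mem_coordsA (ls : List String) : ∀ (n x y : Nat),
    (x, y) ∈ coordsA ls n ↔ ∃ k, y = n + k ∧ cellP ls k x := by
  induction ls with
  | nil => intro n x y; simp [coordsA, cellP]
  | cons l rest ih =>
    intro n x y
    simp only [coordsA, List.mem_append, mem_rowCoordsA, ih]
    constructor
    · rintro (⟨hy, j, hx, hj⟩ | ⟨k, hy, s, hs, hx⟩)
      · exact ⟨0, by omega, l, by simp, by rwa [show x = j by omega]⟩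
      · exact ⟨k + 1, by omega, s, by simpa using hs, hx⟩
    · rintro ⟨k, hy, s, hs, hx⟩
      cases k with
      | zero =>
        left
        simp at hs
        exact ⟨by omega, x, by omega, by simpa [hs] using hx⟩
      | succ k =>
        right
        exact ⟨k, by omega, s, by simpa using hs, hx⟩

theorem cellP_getD (ls : List String) (y x : Nat) :
    cellP ls y x ↔ (ls.getD y "").toList.getD x ' ' = '#' := by
  unfold cellP
  rw [List.getD_eq_getElem?_getD, List.getD_eq_getElem?_getD]
  cases hy : ls[y]? with
  | none =>
    simp only [hy, Option.getD_none]
    constructor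
    · rintro ⟨s, hs, _⟩; cases hs
    · intro h
      exfalso
      revert h
      cases hx : ("" : String).toList[x]? with
      | none => simp
      | some c =>
        exfalso
        have : x < ("" : String).toList.length := (List.getElem?_eq_some_iff.mp hx).1
        simp at this
  | some s =>
    simp only [hy, Option.getD_some, Option.some.injEq]
    constructor
    · rintro ⟨s', hs', h⟩
      cases hs'
      rw [h]
      rfl
    · intro h
      refine ⟨s, rfl, ?_⟩
      cases hx : s.toList[x]? with
      | none => rw [hx] at h; simp at h
      | some c =>
        rw [hx, Option.getD_some] at h
        rw [h]

-- all second components in a row are the line number; coordsA is sorted in y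
theorem pairwise_coordsA (ls : List String) : ∀ (n : Nat),
    ((coordsA ls n).map (fun p => p.2)).Pairwise (· ≤ ·) := by
  induction ls with
  | nil => intro n; simp [coordsA]
  | cons l rest ih =>
    intro n
    simp only [coordsA, List.map_append, List.pairwise_append]
    refine ⟨?_, ih (n + 1), ?_⟩
    · refine List.pairwise_of_forall_mem_list ?_
      intro a ha b hb
      simp only [List.mem_map] at ha hb
      obtain ⟨p, hp, hpa⟩ := ha
      obtain ⟨q, hq, hqb⟩ := hb
      have := ((mem_rowCoordsA n l.toList 0 p.1 p.2).mp hp).1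
      have := ((mem_rowCoordsA n l.toList 0 q.1 q.2).mp hq).1
      omega
    · intro a ha b hb
      simp only [List.mem_map] at ha hb
      obtain ⟨p, hp, hpa⟩ := ha
      obtain ⟨q, hq, hqb⟩ := hb
      have h1 := ((mem_rowCoordsA n l.toList 0 p.1 p.2).mp hp).1
      obtain ⟨k, hk, _⟩ := (mem_coordsA rest (n + 1) q.1 q.2).mp hq
      omega

-- value of the scattered grid at (r, c)
theorem grid_getElem (ymin xmin W : Nat) (cs : List (Nat × Nat)) : ∀ (g : List (List Char)),
    (∀ row ∈ g, row.length = W) →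
    (∀ p ∈ cs, p.2 - ymin < g.length ∧ p.1 - xmin < W) →
    ∀ (r c : Nat),
    ((cs.foldl (fun g p => g.modify (p.2 - ymin) (fun row => row.set (p.1 - xmin) '#')) g)[r]?.bind
        (fun row => row[c]?)) =
      if ∃ p ∈ cs, p.2 - ymin = r ∧ p.1 - xmin = c then some '#'
      else g[r]?.bind (fun row => row[c]?) := by
  induction cs with
  | nil => intro g _ _ r c; simp
  | cons p t ih =>
    intro g hrow hin r c
    simp only [List.foldl_cons]
    set g' := g.modify (p.2 - ymin) (fun row => row.set (p.1 - xmin) '#') with hg'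
    have hrow' : ∀ row ∈ g', row.length = W := by
      intro row hr
      obtain ⟨j, hj⟩ := List.getElem?_of_mem hr
      rw [hg', List.getElem?_modify] at hj
      cases hgj : g[j]? with
      | none => rw [hgj] at hj; simp at hj
      | some row0 =>
        rw [hgj] at hj
        simp only [Option.map_eq_map, Option.map_some, Option.some.injEq] at hj
        have hl0 : row0.length = W := hrow row0 (List.mem_of_getElem? hgj)
        by_cases he : p.2 - ymin = j
        · rw [if_pos he] at hj; rw [← hj, List.length_set]; exact hl0
        · rw [if_neg he] at hj; rw [← hj]; exact hl0
    have hin' : ∀ q ∈ t, q.2 - ymin < g'.length ∧ q.1 - xmin < W := by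
      intro q hq
      have := hin q (by simp [hq])
      simpa [hg', List.length_modify] using this
    rw [ih g' hrow' hin' r c]
    by_cases hex : ∃ q ∈ t, q.2 - ymin = r ∧ q.1 - xmin = c
    · rw [if_pos hex, if_pos]
      obtain ⟨q, hq, h⟩ := hex
      exact ⟨q, by simp [hq], h⟩
    · rw [if_neg hex]
      by_cases hp : p.2 - ymin = r ∧ p.1 - xmin = c
      · rw [if_pos ⟨p, by simp, hp⟩]
        have hr : r < g.length := hp.1 ▸ (hin p (by simp)).1
        obtain ⟨row, hrowr⟩ : ∃ row, g[r]? = some row :=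
          ⟨g[r], List.getElem?_eq_getElem hr⟩
        have hlen : row.length = W := hrow row (List.mem_of_getElem? hrowr)
        have hc : c < row.length := by rw [hlen]; exact hp.2 ▸ (hin p (by simp)).2
        rw [hg', List.getElem?_modify, hrowr]
        simp [Option.map_eq_map, hp.1, hp.2, List.getElem?_set, hc]
      · have hnone : ¬ ∃ q ∈ p :: t, q.2 - ymin = r ∧ q.1 - xmin = c := by
          rintro ⟨q, hq, h⟩
          rcases List.mem_cons.mp hq with rfl | hq'
          · exact hp h
          · exact hex ⟨q, hq', h⟩
        rw [if_neg hnone, hg', List.getElem?_modify]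
        cases hgr : g[r]? with
        | none => simp
        | some row =>
          simp only [Option.map_eq_map, Option.map_some]
          by_cases he : p.2 - ymin = r
          · simp only [he, if_pos rfl, Option.bind_some]
            have hne : p.1 - xmin ≠ c := fun h => hp ⟨he, h⟩
            simp [List.getElem?_set, hne]
          · simp [he]

theorem grid_length (ymin xmin : Nat) (cs : List (Nat × Nat)) : ∀ (g : List (List Char)),
    (cs.foldl (fun g p => g.modify (p.2 - ymin) (fun row => row.set (p.1 - xmin) '#')) g).length
      = g.length := by
  induction cs with
  | nil => intro g; rfl
  | cons p t ih => intro g; rw [List.foldl_cons, ih, List.length_modify]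

-- the two renderings agree row by row and cell by cell
theorem grid_eq_rows (lines : List String) (p : Nat × Nat) (ps : List (Nat × Nat))
    (hc : coordsA lines 0 = p :: ps)
    (xm xM yM : Nat)
    (hxm : ∀ q ∈ p :: ps, xm ≤ q.1) (hxM : ∀ q ∈ p :: ps, q.1 ≤ xM)
    (hym : ∀ q ∈ p :: ps, p.2 ≤ q.2) (hyM : ∀ q ∈ p :: ps, q.2 ≤ yM) :
    (p :: ps).foldl (fun g q => g.modify (q.2 - p.2) (fun row => row.set (q.1 - xm) '#'))
        (List.replicate (yM - p.2 + 1) (List.replicate (xM - xm + 1) ' '))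
      = (List.range' p.2 (yM + 1 - p.2)).map
          (fun y => rowB (lines.getD y "").toList xm xM) := by
  have hpmem : p ∈ p :: ps := by simp
  have hxmM : xm ≤ xM := le_trans (hxm p hpmem) (hxM p hpmem)
  have hymM : p.2 ≤ yM := hyM p hpmem
  set W := xM - xm + 1 with hW
  set H := yM - p.2 + 1 with hH
  set init := List.replicate H (List.replicate W ' ') with hinit
  have hrow : ∀ row ∈ init, row.length = W := by
    intro row hr
    rw [(List.eq_of_mem_replicate hr : row = List.replicate W ' ')]
    exact List.length_replicate
  have hin : ∀ q ∈ p :: ps, q.2 - p.2 < init.length ∧ q.1 - xm < W := by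
    intro q hq
    have h1 := hym q hq; have h2 := hyM q hq
    have h3 := hxm q hq; have h4 := hxM q hq
    constructor
    · rw [hinit, List.length_replicate]; omega
    · omega
  have hglen : ((p :: ps).foldl
      (fun g q => g.modify (q.2 - p.2) (fun row => row.set (q.1 - xm) '#')) init).length = H := by
    rw [grid_length, hinit, List.length_replicate]
  have hkey := grid_getElem p.2 xm W (p :: ps) init hrow hin
  apply List.ext_getElem?
  intro r
  by_cases hr : r < H
  · -- both sides are defined rows; compare them cell by cell
    have hrng : (List.range' p.2 (yM + 1 - p.2))[r]? = some (p.2 + r) := by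
      rw [List.getElem?_range' (by omega), one_mul]
    rw [List.getElem?_map, hrng]
    cases hgr : ((p :: ps).foldl
        (fun g q => g.modify (q.2 - p.2) (fun row => row.set (q.1 - xm) '#')) init)[r]? with
    | none =>
      exfalso
      have := List.getElem?_eq_none_iff.mp hgr
      omega
    | some gr =>
      simp only [Option.map_some, Option.some.injEq]
      apply List.ext_getElem?
      intro c
      have hgc : gr[c]? = if (∃ q ∈ p :: ps, q.2 - p.2 = r ∧ q.1 - xm = c) then some '#'
          else init[r]?.bind (fun row => row[c]?) := by
        have := hkey r c
        rw [hgr] at this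
        simpa using this
      have hinitrc : init[r]?.bind (fun row => row[c]?)
          = if c < W then some ' ' else none := by
        rw [hinit, List.getElem?_replicate, if_pos hr]
        simp only [Option.bind_some]
        by_cases hcW : c < W
        · rw [if_pos hcW, List.getElem?_replicate, if_pos hcW]
        · rw [if_neg hcW, List.getElem?_eq_none_iff.mpr (by rw [List.length_replicate]; omega)]
      have hex : (∃ q ∈ p :: ps, q.2 - p.2 = r ∧ q.1 - xm = c)
          ↔ (c < W ∧ cellP lines (p.2 + r) (xm + c)) := by
        constructor
        · rintro ⟨q, hq, h1, h2⟩
          have hy1 := hym q hq; have hy2 := hyM q hq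
          have hx1 := hxm q hq; have hx2 := hxM q hq
          have hq2 : q.2 = p.2 + r := by omega
          have hq1 : q.1 = xm + c := by omega
          refine ⟨by omega, ?_⟩
          have hmem : (q.1, q.2) ∈ coordsA lines 0 := by rw [hc]; simpa using hq
          obtain ⟨k, hk, hcell⟩ := (mem_coordsA lines 0 q.1 q.2).mp hmem
          have : k = p.2 + r := by omega
          rw [← this, ← hq1]; exact hcell
        · rintro ⟨hcW, hcell⟩
          have hmem : (xm + c, p.2 + r) ∈ coordsA lines 0 :=
            (mem_coordsA lines 0 (xm + c) (p.2 + r)).mpr ⟨p.2 + r, by omega, hcell⟩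
          rw [hc] at hmem
          exact ⟨(xm + c, p.2 + r), hmem, by omega, by omega⟩
      rw [hgc, hinitrc]
      unfold rowB
      rw [List.getElem?_map]
      by_cases hcW : c < W
      · rw [List.getElem?_range' (by omega), one_mul]
        simp only [Option.map_some]
        by_cases hcell : cellP lines (p.2 + r) (xm + c)
        · rw [if_pos (hex.mpr ⟨hcW, hcell⟩)]
          rw [if_pos ((cellP_getD lines (p.2 + r) (xm + c)).mp hcell)]
        · rw [if_neg (fun h => hcell (hex.mp h).2), if_pos hcW,
              if_neg (fun h => hcell ((cellP_getD lines (p.2 + r) (xm + c)).mpr h))]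
      · rw [if_neg (fun h => hcW (hex.mp h).1), if_neg hcW,
            List.getElem?_eq_none_iff.mpr (by rw [List.length_range']; omega)]
        rfl
  · rw [List.getElem?_eq_none_iff.mpr (by omega),
        List.getElem?_eq_none_iff.mpr (by rw [List.length_map, List.length_range']; omega)]

-- ===== VERDICT (by name: the statement is the Claim_ definition above) =====
theorem trim_sky_spec : Claim_equal_trim_sky := by
  intro lines _ hpre
  unfold Spec_trim_sky
  obtain ⟨l, hl, hsh⟩ := hpre
  obtain ⟨k, hk⟩ := List.getElem?_of_mem hl
  obtain ⟨j, hj⟩ := List.getElem?_of_mem hsh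
  have hmem0 : (j, k) ∈ coordsA lines 0 :=
    (mem_coordsA lines 0 j k).mpr ⟨k, by omega, l, hk, hj⟩
  cases hc : coordsA lines 0 with
  | nil => rw [hc] at hmem0; cases hmem0
  | cons p ps =>
    have PW : (p.2 :: ps.map (fun q => q.2)).Pairwise (· ≤ ·) := by
      have := pairwise_coordsA lines 0
      rw [hc] at this
      simpa using this
    have hyminA : (ps.map (fun q => q.2)).foldl min p.2 = p.2 :=
      foldl_min_sorted _ p.2 (fun y hy => List.rel_of_pairwise_cons PW hy)
    have hylast : (ps.map (fun q => q.2)).foldl (fun _ y => y) p.2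
        = (ps.map (fun q => q.2)).foldl max p.2 := foldl_last_sorted _ p.2 PW
    set xm := (ps.map (fun q => q.1)).foldl min p.1 with hxm_def
    set xM := (ps.map (fun q => q.1)).foldl max p.1 with hxM_def
    set yM := (ps.map (fun q => q.2)).foldl max p.2 with hyM_def
    have hA : trim_sky lines = String.mk (joinNL ((p :: ps).foldl
        (fun g q => g.modify (q.2 - p.2) (fun row => row.set (q.1 - xm) '#'))
        (List.replicate (yM - p.2 + 1) (List.replicate (xM - xm + 1) ' ')))) := by
      unfold trim_sky
      rw [hc]
      simp only [List.map_cons, PySem.List.max?_id_cons, PySem.List.min?_id_cons,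
        hyminA, List.map_id']
      rfl
    have hB : trim_sky_alt lines = String.mk (joinNL ((List.range' p.2 (yM + 1 - p.2)).map
        (fun y => rowB (lines.getD y "").toList xm xM))) := by
      unfold trim_sky_alt
      rw [scanB_eq_foldl, hc, List.foldl_cons,
        (show bstep none p = some (p.1, p.1, p.2, p.2) from rfl),
        foldl_bstep_some, hylast]
    rw [hA, hB]
    refine congrArg (fun cs => String.mk (joinNL cs)) ?_
    apply grid_eq_rows lines p ps hc
    · intro q hq
      rcases List.mem_cons.mp hq with rfl | hq'
      · exact (PySem.List.foldl_min_le _ _).1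
      · exact (PySem.List.foldl_min_le _ _).2 _ (List.mem_map_of_mem hq')
    · intro q hq
      rcases List.mem_cons.mp hq with rfl | hq'
      · exact (PySem.List.le_foldl_max _ _).1
      · exact (PySem.List.le_foldl_max _ _).2 _ (List.mem_map_of_mem hq')
    · intro q hq
      rcases List.mem_cons.mp hq with rfl | hq'
      · exact le_refl _
      · exact List.rel_of_pairwise_cons PW (List.mem_map_of_mem hq')
    · intro q hq
      rcases List.mem_cons.mp hq with rfl | hq'
      · exact (PySem.List.le_foldl_max _ _).1
      · exact (PySem.List.le_foldl_max _ _).2 _ (List.mem_map_of_mem hq')
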